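-- pv_equiv track=rewrite | github.com/zuza-zaremska-epm/python_for_dqe_2024_Q3 | 04_Functions/04_02_task1.py | create_working_dictionary
-- ===== SOURCE A (Python) =====
-- from typing import List
--
-- def create_working_dictionary(list_of_dicts: List[dict]) -> dict:
--     """
--     Create working dictionary with kaye and details about number of occurrences
--     in different dictionaries, max value found and max value source dictionary.
--     :param list_of_dicts: list of random number of dictionaries
--     :return: collection of keys with their details
--     Schema: {
--         'g': {'occurrence': 2, 'dict_num': 3, 'value': 5},
--         'b': {'occurrence': 1, 'dict_num': 1, 'value': 1},
--         'd': {'occurrence': 8, 'dict_num': 1, 'value': 9},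
--     }
--     """
--     working_dict = {}
--     for number, dictionary in enumerate(list_of_dicts):
--         dict_num = number + 1
--
--         for letter, new_value in dictionary.items():
--             if working_dict.get(letter):
--                 working_dict[letter]['occurrence'] += 1
--                 old_letter_value = working_dict[letter]['value']
--                 if new_value > old_letter_value:
--                     working_dict[letter].update(
--                         {'dict_num': dict_num, 'value': new_value})
--             else:
--                 working_dict[letter] = {
--                     'dict_num': dict_num,
--                     'value': new_value,
--                     'occurrence': 1
--                 }
--
--     return working_dict
-- ===== SOURCE B (Python) =====
-- from typing import List
--
--
-- def _summary(pairs):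
--     """Summarise one key's (dict_num, value) pairs: count them and keep the
--     max value with strict > so the earliest dict achieving the max wins."""
--     best_num, best_val = pairs[0]
--     for num, val in pairs[1:]:
--         if val > best_val:
--             best_num, best_val = num, val
--     return {'dict_num': best_num, 'value': best_val, 'occurrence': len(pairs)}
--
--
-- def create_working_dictionary(list_of_dicts: List[dict]) -> dict:
--     groups = {}
--     for number, dictionary in enumerate(list_of_dicts):
--         for letter, value in dictionary.items():
--             groups.setdefault(letter, []).append((number + 1, value))
--     return {letter: _summary(pairs) for letter, pairs in groups.items()}
-- ===== Notes on version B (the rewrite author's own statement) =====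
-- stated objective: alternative
-- what changed: Replaces A's single pass that updates a nested occurrence/max record in place per item with a two-phase decomposition: first group (dict_num, value) pairs per key in encounter order, then summarise each group (length = occurrence, strict-> scan = earliest max) via a dict comprehension.
import Mathlib
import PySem

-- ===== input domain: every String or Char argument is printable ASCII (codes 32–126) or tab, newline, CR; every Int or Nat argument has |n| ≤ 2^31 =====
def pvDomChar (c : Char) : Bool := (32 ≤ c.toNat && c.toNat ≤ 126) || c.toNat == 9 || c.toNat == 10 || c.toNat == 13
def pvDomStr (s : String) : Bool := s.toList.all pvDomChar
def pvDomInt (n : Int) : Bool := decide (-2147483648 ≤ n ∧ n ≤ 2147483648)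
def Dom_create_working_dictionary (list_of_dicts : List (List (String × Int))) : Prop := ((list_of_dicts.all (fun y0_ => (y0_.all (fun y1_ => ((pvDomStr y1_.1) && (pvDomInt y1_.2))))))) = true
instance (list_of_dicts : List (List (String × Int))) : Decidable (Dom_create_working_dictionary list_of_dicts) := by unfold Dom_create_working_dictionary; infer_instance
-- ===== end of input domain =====

-- B replaces A's in-place update of a nested occurrence/max record per item by a two-phase
-- decomposition (group pairs per key, then summarise each group); objective: alternative.

-- ===== PORT A =====
-- the body of A's `if` branch: `working_dict[letter]['occurrence'] += 1`, read the old
-- value, and the conditional `.update({'dict_num': …, 'value': …})`, all on the inner dict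
-- (the defaults fed to modify/getD are never used: both keys are always present)
def pvUpdateEntry (inner : PySem.Dict String Int) (dict_num new_value : Int) :
    PySem.Dict String Int :=
  let inner := inner.modify "occurrence" 0 (· + 1)
  let old_letter_value := inner.getD "value" 0
  if new_value > old_letter_value then
    (inner.insert "dict_num" dict_num).insert "value" new_value
  else
    inner

def create_working_dictionary (list_of_dicts : List (List (String × Int))) :
    List (String × List (String × Int)) :=
  let working_dict : PySem.Dict String (PySem.Dict String Int) :=
    (PySem.List.enumerate list_of_dicts).foldl (fun working_dict p =>
      let dict_num : Int := p.1 + 1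
      p.2.foldl (fun working_dict q =>
        -- `if working_dict.get(letter):` — truthiness; every stored inner dict is a
        -- non-empty (3-key) dict, so the test is exactly "letter is present"
        match working_dict.get? q.1 with
        | some _ =>
            working_dict.modify q.1 PySem.Dict.empty
              (fun inner => pvUpdateEntry inner dict_num q.2)
        | none =>
            -- the dict literal {'dict_num': …, 'value': …, 'occurrence': 1} (distinct keys)
            working_dict.insert q.1
              (PySem.Dict.mk [("dict_num", dict_num), ("value", q.2), ("occurrence", 1)])
      ) working_dict
    ) PySem.Dict.empty
  working_dict.items.map (fun kv => (kv.1, kv.2.items))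

-- ===== PORT B =====
-- `_summary(pairs)`: pairs[0], scan pairs[1:] keeping the max value with strict >,
-- return the 3-key dict literal (distinct keys, given as its items list)
def pvSummary (pairs : List (Int × Int)) : List (String × Int) :=
  match pairs with
  | [] => []  -- unreachable: every group in `groups` is non-empty (Python indexes pairs[0])
  | p0 :: rest =>
    let best := rest.foldl (fun b q => if q.2 > b.2 then q else b) p0
    [("dict_num", best.1), ("value", best.2), ("occurrence", ((rest.length + 1 : Nat) : Int))]

def create_working_dictionary_alt (list_of_dicts : List (List (String × Int))) :
    List (String × List (String × Int)) :=
  let groups : PySem.Dict String (List (Int × Int)) :=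
    (PySem.List.enumerate list_of_dicts).foldl (fun groups p =>
      p.2.foldl (fun groups q =>
        -- groups.setdefault(letter, []).append((number + 1, value))
        groups.modify q.1 [] (fun ps => ps ++ [(p.1 + 1, q.2)])) groups
    ) PySem.Dict.empty
  -- {letter: _summary(pairs) for letter, pairs in groups.items()}
  groups.items.map (fun kp => (kp.1, pvSummary kp.2))

-- ===== PRECONDITION & SPEC =====
def Spec_create_working_dictionary (list_of_dicts : List (List (String × Int))) (out : List (String × List (String × Int))) : Prop := out = create_working_dictionary_alt list_of_dicts
instance (list_of_dicts : List (List (String × Int))) (out : List (String × List (String × Int))) : Decidable (Spec_create_working_dictionary list_of_dicts out) := by unfold Spec_create_working_dictionary; infer_instance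

-- ===== CLAIM (what is proved, stated in full; the proofs are below) =====
def Claim_equal_create_working_dictionary : Prop := ∀ (list_of_dicts : List (List (String × Int))), Dom_create_working_dictionary list_of_dicts → Spec_create_working_dictionary list_of_dicts (create_working_dictionary list_of_dicts)

-- ===== LEMMAS AND PROOFS =====

-- summary of one group, as the inner dict A maintains
def pvS (ps : List (Int × Int)) : PySem.Dict String Int := PySem.Dict.mk (pvSummary ps)

-- A's working dict is B's grouping dict with every group summarised
def pvPhi (g : PySem.Dict String (List (Int × Int))) :
    PySem.Dict String (PySem.Dict String Int) :=
  PySem.Dict.mk (g.items.map (fun kp => (kp.1, pvS kp.2)))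

-- every group is non-empty
def pvInv (g : PySem.Dict String (List (Int × Int))) : Prop :=
  ∀ kp ∈ g.items, kp.2 ≠ []

theorem pv_get?_phi (g : PySem.Dict String (List (Int × Int))) (k : String) :
    (pvPhi g).get? k = (g.get? k).map pvS := by
  obtain ⟨l⟩ := g
  induction l with
  | nil => rfl
  | cons kp t ih =>
    simp only [pvPhi, List.map_cons] at *
    rw [PySem.Dict.get?_mk_cons, PySem.Dict.get?_mk_cons]
    by_cases h : kp.1 == k
    · simp [h]
    · simpa [h] using ih

theorem pv_contains_phi (g : PySem.Dict String (List (Int × Int))) (k : String) :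
    (pvPhi g).contains k = g.contains k := by
  rw [PySem.Dict.contains_eq_isSome_get?, PySem.Dict.contains_eq_isSome_get?, pv_get?_phi,
    Option.isSome_map]

theorem pv_phi_insert (g : PySem.Dict String (List (Int × Int))) (k : String)
    (w : List (Int × Int)) : pvPhi (g.insert k w) = (pvPhi g).insert k (pvS w) := by
  apply PySem.Dict.ext
  by_cases h : g.contains k
  · rw [show (pvPhi (g.insert k w)).items
        = (g.insert k w).items.map (fun kp => (kp.1, pvS kp.2)) from rfl,
      PySem.Dict.items_insert_of_contains _ _ h,
      PySem.Dict.items_insert_of_contains _ _ (by rw [pv_contains_phi]; exact h)]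
    rw [show (pvPhi g).items = g.items.map (fun kp => (kp.1, pvS kp.2)) from rfl]
    rw [List.map_map, List.map_map]
    apply List.map_congr_left
    intro p _
    by_cases hp : p.1 = k <;> simp [hp]
  · rw [show (pvPhi (g.insert k w)).items
        = (g.insert k w).items.map (fun kp => (kp.1, pvS kp.2)) from rfl,
      PySem.Dict.items_insert_of_not_contains _ _ (by simp [h]),
      PySem.Dict.items_insert_of_not_contains _ _
        (by rw [pv_contains_phi]; simp [h])]
    simp [pvPhi]

-- the computational heart: A's in-place update of a summary record IS appending a pair
-- to the group and re-summarising
theorem pv_update_summary (ps : List (Int × Int)) (hps : ps ≠ []) (n v : Int) :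
    pvUpdateEntry (pvS ps) n v = pvS (ps ++ [(n, v)]) := by
  obtain ⟨p0, rest, rfl⟩ := List.exists_cons_of_ne_nil hps
  show pvUpdateEntry (pvS (p0 :: rest)) n v = pvS (p0 :: (rest ++ [(n, v)]))
  simp only [pvS, pvSummary, List.foldl_append, List.foldl_cons, List.foldl_nil]
  simp only [pvUpdateEntry, PySem.Dict.modify, PySem.Dict.insert, PySem.Dict.contains,
    PySem.Dict.getD, PySem.Dict.get?]
  by_cases h : v > (rest.foldl (fun b q => if q.2 > b.2 then q else b) p0).2 <;>
    simp [h]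

theorem pv_step_comm (g : PySem.Dict String (List (Int × Int))) (hg : pvInv g)
    (n v : Int) (k : String) :
    (match (pvPhi g).get? k with
     | some _ => (pvPhi g).modify k PySem.Dict.empty (fun inner => pvUpdateEntry inner n v)
     | none => (pvPhi g).insert k (PySem.Dict.mk [("dict_num", n), ("value", v), ("occurrence", 1)]))
    = pvPhi (g.modify k [] (fun ps => ps ++ [(n, v)])) := by
  rw [pv_get?_phi]
  cases h : g.get? k with
  | none =>
    simp only [Option.map_none]
    rw [PySem.Dict.modify, PySem.Dict.getD_of_get?_eq_none _ _ h, List.nil_append,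
      pv_phi_insert]
    rfl
  | some ps =>
    simp only [Option.map_some]
    rw [PySem.Dict.modify, PySem.Dict.modify,
      PySem.Dict.getD_of_get?_eq_some _ _ h,
      PySem.Dict.getD_of_get?_eq_some _ _ (by rw [pv_get?_phi, h]; rfl),
      pv_update_summary ps (hg _ (PySem.Dict.mem_items_of_get?_eq_some _ h)) n v,
      pv_phi_insert]

theorem pv_inv_step (g : PySem.Dict String (List (Int × Int))) (hg : pvInv g)
    (x : Int × Int) (k : String) :
    pvInv (g.modify k [] (fun ps => ps ++ [x])) := by
  intro kp hkp
  rw [PySem.Dict.modify] at hkp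
  rcases (PySem.Dict.mem_items_insert _ _ _ _).1 hkp with h | h
  · subst h; simp
  · exact hg _ h.1

theorem pv_inner_fold (d : List (String × Int)) (n : Int) :
    ∀ g : PySem.Dict String (List (Int × Int)), pvInv g → g.keys.Nodup →
    (d.foldl (fun working_dict q =>
        match working_dict.get? q.1 with
        | some _ =>
            working_dict.modify q.1 PySem.Dict.empty
              (fun inner => pvUpdateEntry inner n q.2)
        | none =>
            working_dict.insert q.1
              (PySem.Dict.mk [("dict_num", n), ("value", q.2), ("occurrence", 1)])) (pvPhi g)
      = pvPhi (d.foldl (fun groups q =>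
          groups.modify q.1 [] (fun ps => ps ++ [(n, q.2)])) g))
    ∧ pvInv (d.foldl (fun groups q =>
          groups.modify q.1 [] (fun ps => ps ++ [(n, q.2)])) g)
    ∧ (d.foldl (fun groups q =>
          groups.modify q.1 [] (fun ps => ps ++ [(n, q.2)])) g).keys.Nodup := by
  induction d with
  | nil => intro g hg hnd; exact ⟨rfl, hg, hnd⟩
  | cons q t ih =>
    intro g hg hnd
    have hstep := pv_step_comm g hg n q.2 q.1
    have hnd' : (g.modify q.1 [] (fun ps => ps ++ [(n, q.2)])).keys.Nodup := by
      rw [PySem.Dict.modify]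
      by_cases hc : g.contains q.1
      · rw [PySem.Dict.keys_insert_of_contains _ _ hc]; exact hnd
      · have hq : q.1 ∉ g.keys := fun ha => hc ((PySem.Dict.contains_iff_mem_keys _ _).2 ha)
        rw [PySem.Dict.keys_insert_of_not_contains _ _ (by simp [hc])]
        exact List.Nodup.append hnd (List.nodup_singleton _)
          (by intro a ha hb; simp only [List.mem_singleton] at hb; exact hq (hb ▸ ha))
    obtain ⟨h1, h2, h3⟩ := ih (g.modify q.1 [] (fun ps => ps ++ [(n, q.2)]))
      (pv_inv_step g hg _ _) hnd'
    refine ⟨?_, h2, h3⟩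
    simp only [List.foldl_cons]
    rw [hstep]
    exact h1

theorem pv_outer_fold (L : List (Int × List (String × Int))) :
    ∀ g : PySem.Dict String (List (Int × Int)), pvInv g → g.keys.Nodup →
    (L.foldl (fun working_dict p =>
        p.2.foldl (fun working_dict q =>
          match working_dict.get? q.1 with
          | some _ =>
              working_dict.modify q.1 PySem.Dict.empty
                (fun inner => pvUpdateEntry inner (p.1 + 1) q.2)
          | none =>
              working_dict.insert q.1
                (PySem.Dict.mk [("dict_num", p.1 + 1), ("value", q.2), ("occurrence", 1)]))
          working_dict) (pvPhi g)
      = pvPhi (L.foldl (fun groups p =>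
          p.2.foldl (fun groups q =>
            groups.modify q.1 [] (fun ps => ps ++ [(p.1 + 1, q.2)])) groups) g)) := by
  induction L with
  | nil => intro g _ _; rfl
  | cons p t ih =>
    intro g hg hnd
    obtain ⟨h1, h2, h3⟩ := pv_inner_fold p.2 (p.1 + 1) g hg hnd
    simp only [List.foldl_cons]
    rw [h1]
    exact ih _ h2 h3

-- ===== VERDICT (by name: the statement is the Claim_ definition above) =====
theorem create_working_dictionary_spec : Claim_equal_create_working_dictionary := by
  intro lds _
  show create_working_dictionary lds = create_working_dictionary_alt lds
  simp only [create_working_dictionary, create_working_dictionary_alt]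
  have h := pv_outer_fold (PySem.List.enumerate lds) PySem.Dict.empty
    (by intro kp hkp; cases hkp) (by simp [PySem.Dict.keys, PySem.Dict.empty])
  rw [show (PySem.Dict.empty : PySem.Dict String (PySem.Dict String Int))
      = pvPhi PySem.Dict.empty from rfl, h]
  simp [pvPhi, pvS, List.map_map, Function.comp]
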